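-- pv_equiv track=rewrite | github.com/pypi-data/pypi-mirror-106 | packages/rnmd/rnmd-1.1.0-py3-none-any.whl/rnmd/models/code_parser.py | get_enclosed_indices
-- ===== SOURCE A (Python) =====
-- def get_enclosed_indices(token, text):
--     lines = text.split('\n')
--
--     enclosed_ranges = []
--
--     startindex = -1
--     endindex = -1
--     for index in range(0, len(lines)):
--         line = lines[index]
--
--         if(line.startswith(token)):
--             if(startindex == -1):
--                 startindex = index
--             else:
--                 endindex = index
--
--         if(startindex != -1 and endindex != -1):
--             enclosed_ranges.append((startindex, endindex + 1))
--
--             startindex = -1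
--             endindex = -1
--
--     if(startindex > -1 or endindex > -1):
--         raise Exception("Invalid Markdown document, code block not closed")
--
--     return enclosed_ranges
-- ===== SOURCE B (Python) =====
-- def _pair_up(xs):
--     if len(xs) < 2:
--         return []
--     return [(xs[0], xs[1] + 1)] + _pair_up(xs[2:])
--
--
-- def get_enclosed_indices(token, text):
--     marks = [i for i, line in enumerate(text.split('\n')) if line.startswith(token)]
--     if len(marks) % 2 == 1:
--         raise Exception("Invalid Markdown document, code block not closed")
--     return _pair_up(marks)
-- ===== Notes on version B (the rewrite author's own statement) =====
-- stated objective: simpler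
-- what changed: Replaces the stateful startindex/endindex toggle loop with a collect-then-pair decomposition: first gather all matching line indices, then pair them up consecutively.
import Mathlib
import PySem

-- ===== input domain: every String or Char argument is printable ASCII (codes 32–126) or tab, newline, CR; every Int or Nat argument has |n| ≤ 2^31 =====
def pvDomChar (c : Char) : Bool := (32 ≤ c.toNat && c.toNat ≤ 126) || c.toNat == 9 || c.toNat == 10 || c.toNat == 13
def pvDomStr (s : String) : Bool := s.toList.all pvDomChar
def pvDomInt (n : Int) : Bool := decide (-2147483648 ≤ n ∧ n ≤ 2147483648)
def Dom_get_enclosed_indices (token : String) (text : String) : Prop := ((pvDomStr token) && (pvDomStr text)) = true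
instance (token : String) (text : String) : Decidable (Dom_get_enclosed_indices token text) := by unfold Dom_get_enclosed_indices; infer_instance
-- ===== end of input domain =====

-- B replaces A's stateful startindex/endindex toggle loop by collect-all-marks-then-pair (simpler decomposition, same cost).

-- ===== PORT A =====
-- A's for-loop over range(0, len(lines)) with lines[index], carried as a recursion over the
-- lines with the running index and the (enclosed_ranges, startindex, endindex) state.
def pvLoopA (token : String) : List String → Int → List (Int × Int) → Int → Int → List (Int × Int) × Int × Int
  | [], _, acc, s, e => (acc, s, e)
  | line :: rest, index, acc, s, e =>
    let se : Int × Int :=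
      if PySem.Str.startswith line token then
        (if s = -1 then (index, e) else (s, index))
      else (s, e)
    if se.1 ≠ -1 ∧ se.2 ≠ -1 then
      pvLoopA token rest (index + 1) (acc ++ [(se.1, se.2 + 1)]) (-1) (-1)
    else
      pvLoopA token rest (index + 1) acc se.1 se.2

def get_enclosed_indices (token : String) (text : String) : List (Int × Int) :=
  let lines := (PySem.Str.split? text "\n").getD []
  let r := pvLoopA token lines 0 [] (-1) (-1)
  -- Python raises "code block not closed" when r.2.1 > -1 or r.2.2 > -1; Pre_ excludes those inputs
  r.1

-- ===== PORT B =====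
def pvPairUp : List Int → List (Int × Int)
  | a :: b :: rest => (a, b + 1) :: pvPairUp rest
  | _ => []

def get_enclosed_indices_alt (token : String) (text : String) : List (Int × Int) :=
  let marks := ((PySem.List.enumerate ((PySem.Str.split? text "\n").getD [])).filter
      (fun p => PySem.Str.startswith p.2 token)).map (·.1)
  -- Python raises on odd len(marks); Pre_ excludes those inputs
  if marks.length % 2 == 1 then [] else pvPairUp marks

-- ===== PRECONDITION & SPEC =====
-- Pre_ excludes exactly the inputs on which A raises ("code block not closed"):
-- texts with an odd number of lines starting with token.
def Pre_get_enclosed_indices (token : String) (text : String) : Prop :=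
  (((PySem.Str.split? text "\n").getD []).countP (fun l => PySem.Str.startswith l token)) % 2 = 0

instance (token : String) (text : String) : Decidable (Pre_get_enclosed_indices token text) := by
  unfold Pre_get_enclosed_indices; infer_instance

def pvWitness_get_enclosed_indices : String × String := ("```", "```\nprint(1)\n```\ntail")

def Spec_get_enclosed_indices (token : String) (text : String) (out : List (Int × Int)) : Prop :=
  out = get_enclosed_indices_alt token text
instance (token : String) (text : String) (out : List (Int × Int)) : Decidable (Spec_get_enclosed_indices token text out) := by
  unfold Spec_get_enclosed_indices; infer_instance

-- ===== CLAIM (what is proved, stated in full; the proofs are below) =====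
def Claim_equal_get_enclosed_indices : Prop := ∀ (token : String) (text : String), Dom_get_enclosed_indices token text → Pre_get_enclosed_indices token text → Spec_get_enclosed_indices token text (get_enclosed_indices token text)

-- ===== LEMMAS AND PROOFS =====

-- the list of indices of lines starting with token, counting from idx
def pvMarks (token : String) : List String → Int → List Int
  | [], _ => []
  | l :: rest, idx =>
    if PySem.Str.startswith l token then idx :: pvMarks token rest (idx + 1)
    else pvMarks token rest (idx + 1)

theorem pvMarks_eq_enum (token : String) (lines : List String) (idx : Int) :
    ((PySem.List.enumerate lines idx).filter (fun p => PySem.Str.startswith p.2 token)).map (·.1)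
      = pvMarks token lines idx := by
  induction lines generalizing idx with
  | nil => rfl
  | cons l rest ih =>
    simp only [PySem.List.enumerate_cons, List.filter_cons, pvMarks]
    by_cases h : PySem.Str.startswith l token = true
    · rw [if_pos h, if_pos h, List.map_cons, ih]
    · rw [if_neg h, if_neg h, ih]

theorem pvMarks_length (token : String) (lines : List String) (idx : Int) :
    (pvMarks token lines idx).length = lines.countP (fun l => PySem.Str.startswith l token) := by
  induction lines generalizing idx with
  | nil => rfl
  | cons l rest ih =>
    simp only [pvMarks, List.countP_cons]
    by_cases h : PySem.Str.startswith l token = true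
    · rw [if_pos h, if_pos h, List.length_cons, ih]
    · rw [if_neg h, if_neg h, ih, add_zero]

-- loop invariant: A's toggle loop pairs up the marks
theorem pvLoopA_inv (token : String) (lines : List String) :
    ∀ (idx : Int), 0 ≤ idx → ∀ (acc : List (Int × Int)) (s : Int), (s = -1 ∨ 0 ≤ s) →
      (pvLoopA token lines idx acc s (-1)).1
        = acc ++ pvPairUp ((if s = -1 then [] else [s]) ++ pvMarks token lines idx) := by
  induction lines with
  | nil =>
    intro idx _ acc s _
    by_cases h1 : s = -1
    · simp [pvLoopA, pvMarks, h1, pvPairUp]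
    · simp [pvLoopA, pvMarks, h1, pvPairUp]
  | cons l rest ih =>
    intro idx hidx acc s hs
    have hidxne : (idx : Int) ≠ -1 := by omega
    simp only [pvLoopA, pvMarks]
    by_cases hl : PySem.Str.startswith l token = true
    · rw [if_pos hl, if_pos hl]
      by_cases h1 : s = -1
      · -- first mark of a pair: startindex := idx, no append this round
        rw [if_pos h1]
        rw [if_neg (by simp)]
        rw [ih (idx + 1) (by omega) acc idx (Or.inr hidx)]
        rw [if_neg hidxne, if_pos h1]
        rfl
      · -- second mark: endindex := idx, append (s, idx + 1) and reset
        rw [if_neg h1]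
        rw [if_pos ⟨h1, hidxne⟩]
        rw [ih (idx + 1) (by omega) (acc ++ [(s, idx + 1)]) (-1) (Or.inl rfl)]
        rw [if_neg h1, if_pos rfl]
        simp [pvPairUp]
    · rw [if_neg hl, if_neg hl]
      by_cases h1 : s = -1
      · rw [if_neg (by simp [h1])]
        exact ih (idx + 1) (by omega) acc s hs
      · rw [if_neg (by simp)]
        exact ih (idx + 1) (by omega) acc s hs

theorem get_enclosed_indices_eq (token : String) (text : String) :
    get_enclosed_indices token text
      = pvPairUp (pvMarks token ((PySem.Str.split? text "\n").getD []) 0) := by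
  unfold get_enclosed_indices
  have := pvLoopA_inv token ((PySem.Str.split? text "\n").getD []) 0 (by norm_num) [] (-1) (Or.inl rfl)
  simpa using this

-- ===== VERDICT (by name: the statement is the Claim_ definition above) =====
theorem get_enclosed_indices_spec : Claim_equal_get_enclosed_indices := by
  intro token text _ hpre
  unfold Spec_get_enclosed_indices
  rw [get_enclosed_indices_eq]
  unfold get_enclosed_indices_alt
  rw [pvMarks_eq_enum]
  have hlen : (pvMarks token ((PySem.Str.split? text "\n").getD []) 0).length % 2 = 0 := by
    rw [pvMarks_length]; exact hpre
  simp [hlen]
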